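-- pv_equiv track=rewrite | github.com/swazara/bioinformatics-active-learning | Chapter 1/Find DnaA boxes in Salmonella enterica/BA1/BA1n/GenerateNeighborhood.py | d_neighborhood
-- ===== SOURCE A (Python) =====
-- def d_neighborhood(pattern, d):
--
--     def generate(idx, remaining_d):
--         if idx == len(pattern):
--             return [""]
--         results = []
--         original = pattern[idx]
--         for suffix in generate(idx + 1, remaining_d):
--             results.append(original + suffix)
--         if remaining_d > 0:
--             for base in "ACGT":
--                 if base != original:
--                     for suffix in generate(idx + 1, remaining_d - 1):
--                         results.append(base + suffix)
--         return results
--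
--     return set(generate(0, d))
-- ===== SOURCE B (Python) =====
-- def d_neighborhood(pattern, d):
--     # Iterative prefix extension: one pass over the pattern, maintaining
--     # (prefix, remaining_d) states instead of naive recursion on suffixes.
--     states = [("", d)]
--     for ch in pattern:
--         new_states = []
--         for prefix, rd in states:
--             new_states.append((prefix + ch, rd))
--             if rd > 0:
--                 for base in "ACGT":
--                     if base != ch:
--                         new_states.append((prefix + base, rd - 1))
--         states = new_states
--     return {s for s, _ in states}
-- ===== Notes on version B (the rewrite author's own statement) =====
-- stated objective: alternative
-- what changed: Replaces the naive suffix recursion (which re-generates the suffix neighborhood once per alternative base) with a single iterative left-to-right pass that extends a worklist of (prefix, remaining_d) states, one character of the pattern at a time.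
import Mathlib
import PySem

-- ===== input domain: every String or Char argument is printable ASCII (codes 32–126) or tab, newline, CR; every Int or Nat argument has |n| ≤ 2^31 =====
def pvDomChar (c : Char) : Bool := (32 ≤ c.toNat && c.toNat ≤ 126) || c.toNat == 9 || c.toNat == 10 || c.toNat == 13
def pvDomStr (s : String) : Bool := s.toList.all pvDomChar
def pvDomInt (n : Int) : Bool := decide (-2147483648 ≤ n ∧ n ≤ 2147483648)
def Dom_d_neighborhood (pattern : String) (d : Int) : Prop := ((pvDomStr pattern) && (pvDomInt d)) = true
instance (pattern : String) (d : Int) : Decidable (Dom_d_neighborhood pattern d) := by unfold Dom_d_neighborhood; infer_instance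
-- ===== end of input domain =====

-- B replaces A's naive suffix recursion by a single iterative forward pass over
-- the pattern extending (prefix, remaining_d) states; same cost, different structure.

-- ===== PORT A =====
-- A's inner 'generate(idx, remaining_d)': recursion over the remaining suffix of
-- the pattern (strings handled as List Char, wrapped into String at the end).
def pvGenA : List Char → Int → List (List Char)
  | [], _ => [[]]
  | c :: rest, rd =>
      ((pvGenA rest rd).map (fun suffix => c :: suffix)) ++
      (if rd > 0 then
        ['A', 'C', 'G', 'T'].flatMap (fun base =>
          if base ≠ c then (pvGenA rest (rd - 1)).map (fun suffix => base :: suffix)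
          else [])
      else [])

def d_neighborhood (pattern : String) (d : Int) : List String :=
  PySem.Set.ofList ((pvGenA pattern.toList d).map (fun cs => String.ofList cs))

-- ===== PORT B =====
-- one step of B's loop body: extend every (prefix, remaining_d) state by one character
def pvStepB (states : List (List Char × Int)) (ch : Char) : List (List Char × Int) :=
  states.flatMap (fun st =>
    (st.1 ++ [ch], st.2) ::
    (if st.2 > 0 then
      ['A', 'C', 'G', 'T'].flatMap (fun base =>
        if base ≠ ch then [(st.1 ++ [base], st.2 - 1)] else [])
    else []))

def d_neighborhood_alt (pattern : String) (d : Int) : List String :=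
  PySem.Set.ofList ((pattern.toList.foldl pvStepB [([], d)]).map (fun st => String.ofList st.1))

-- ===== PRECONDITION & SPEC =====
def Spec_d_neighborhood (pattern : String) (d : Int) (out : List String) : Prop := out = d_neighborhood_alt pattern d
instance (pattern : String) (d : Int) (out : List String) : Decidable (Spec_d_neighborhood pattern d out) := by unfold Spec_d_neighborhood; infer_instance

-- ===== CLAIM (what is proved, stated in full; the proofs are below) =====
def Claim_equal_d_neighborhood : Prop := ∀ (pattern : String) (d : Int), Dom_d_neighborhood pattern d → Spec_d_neighborhood pattern d (d_neighborhood pattern d)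

-- ===== LEMMAS AND PROOFS =====

-- Loop invariant: B's foldl with any worklist of states computes, per state,
-- A's suffix neighborhood appended to that state's prefix (in the same order).
theorem pvFoldl_stepB (cs : List Char) :
    ∀ states : List (List Char × Int),
      (cs.foldl pvStepB states).map Prod.fst
        = states.flatMap (fun st => (pvGenA cs st.2).map (fun suffix => st.1 ++ suffix)) := by
  induction cs with
  | nil =>
      intro states
      simp only [List.foldl_nil, pvGenA, List.map_cons, List.map_nil, List.append_nil]
      induction states with
      | nil => rfl
      | cons a t iht => simp_all
  | cons c cs ih =>
      intro states
      have hstep : ∀ st : List Char × Int,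
          ((pvStepB [st] c).flatMap
              (fun st' => (pvGenA cs st'.2).map (fun suffix => st'.1 ++ suffix)))
            = (pvGenA (c :: cs) st.2).map (fun suffix => st.1 ++ suffix) := by
        intro st
        by_cases h : st.2 > 0
        · simp only [pvStepB, pvGenA, if_pos h, List.flatMap_cons, List.flatMap_nil,
            List.append_nil, List.flatMap_append, List.map_append, List.map_map]
          split_ifs <;> simp [Function.comp_def, List.append_assoc]
        · simp only [pvStepB, pvGenA, if_neg h, List.flatMap_cons, List.flatMap_nil,
            List.append_nil]
          simp [Function.comp_def]
      calc ((c :: cs).foldl pvStepB states).map Prod.fst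
          = (cs.foldl pvStepB (pvStepB states c)).map Prod.fst := rfl
        _ = (pvStepB states c).flatMap
              (fun st' => (pvGenA cs st'.2).map (fun suffix => st'.1 ++ suffix)) := ih _
        _ = states.flatMap (fun st => (pvStepB [st] c).flatMap
              (fun st' => (pvGenA cs st'.2).map (fun suffix => st'.1 ++ suffix))) := by
              have hsplit : pvStepB states c = states.flatMap (fun st => pvStepB [st] c) := by
                simp [pvStepB]
              rw [hsplit, List.flatMap_assoc]
        _ = states.flatMap (fun st => (pvGenA (c :: cs) st.2).map (fun suffix => st.1 ++ suffix)) := by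
              refine List.flatMap_congr ?_
              intro st _
              exact hstep st

-- ===== VERDICT (by name: the statement is the Claim_ definition above) =====
theorem d_neighborhood_spec : Claim_equal_d_neighborhood := by
  intro pattern d _
  unfold Spec_d_neighborhood d_neighborhood d_neighborhood_alt
  have h := pvFoldl_stepB pattern.toList [(([] : List Char), d)]
  simp only [List.flatMap_singleton, List.nil_append, List.map_id'] at h
  have hmap : (pattern.toList.foldl pvStepB [(([] : List Char), d)]).map (fun st => String.ofList st.1)
      = (pvGenA pattern.toList d).map (fun cs => String.ofList cs) := by
    rw [show (fun st : List Char × Int => String.ofList st.1)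
          = (fun cs => String.ofList cs) ∘ Prod.fst from rfl, ← List.map_map, h]
  rw [hmap]
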